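-- pv_equiv track=rewrite | github.com/JungTag/Algorithm_Study | CT/DM/d2.py | solution
-- ===== SOURCE A (Python) =====
-- def solution(leave, day, holidays):
--     FIRST_OF_MONTH = 1
--     LAST_OF_MONTH = 30
--     answer = -1
--
--     add_holidays(day, holidays)
--     holidays_set = set(holidays)
--
--     for start_day in range(FIRST_OF_MONTH, LAST_OF_MONTH+1):
--         cnt = 0
--         left_leave = leave
--         for vacation_day in range(start_day, LAST_OF_MONTH+1):
--             if vacation_day not in holidays_set:
--                 if left_leave > 0:
--                     left_leave -= 1
--                 else:
--                     break
--             cnt += 1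
--         answer = max(answer, cnt)
--
--     return answer
--
-- def add_holidays(day, holidays):
--     LAST_OF_MONTH = 30
--     weekend_start = {'MON': 6, 'TUE': 5, 'WED': 4, 'THU': 3, 'FRI': 2, 'SAT': 1, 'SUN': 7}
--     weekend_start_day = weekend_start[day]
--
--     if day == 'SUN':
--         holidays.append(1)
--
--     for day in range(weekend_start_day, LAST_OF_MONTH+1, 7):
--         next_day = day+1
--         if day <= LAST_OF_MONTH:
--             holidays.append(day)
--         if next_day <= LAST_OF_MONTH:
--             holidays.append(next_day)
-- ===== SOURCE B (Python) =====
-- def solution(leave, day, holidays):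
--     add_holidays(day, holidays)
--     holidays_set = set(holidays)
--     budget = leave if leave > 0 else 0
--
--     # prefix[j] = number of non-holiday days among 1..j
--     prefix = [0]
--     total = 0
--     for d in range(1, 31):
--         if d not in holidays_set:
--             total += 1
--         prefix.append(total)
--
--     best = 0
--     for s in range(1, 31):
--         span = 0
--         for d in range(s, 31):
--             if prefix[d] - prefix[s - 1] <= budget:
--                 span += 1
--         best = max(best, span)
--     return best
--
-- def add_holidays(day, holidays):
--     LAST_OF_MONTH = 30
--     weekend_start = {'MON': 6, 'TUE': 5, 'WED': 4, 'THU': 3, 'FRI': 2, 'SAT': 1, 'SUN': 7}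
--     weekend_start_day = weekend_start[day]
--
--     if day == 'SUN':
--         holidays.append(1)
--
--     for day in range(weekend_start_day, LAST_OF_MONTH+1, 7):
--         next_day = day+1
--         if day <= LAST_OF_MONTH:
--             holidays.append(day)
--         if next_day <= LAST_OF_MONTH:
--             holidays.append(next_day)
-- ===== Notes on version B (the rewrite author's own statement) =====
-- stated objective: alternative
-- what changed: Replaced A's per-start greedy inner loop (decrement a leave counter, break when it runs out) by a once-computed prefix count of non-holiday days and, per start, a count of the days d whose window [s..d] contains at most max(leave,0) non-holidays; the -1 init and greedy-break machinery disappear.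
import Mathlib
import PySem

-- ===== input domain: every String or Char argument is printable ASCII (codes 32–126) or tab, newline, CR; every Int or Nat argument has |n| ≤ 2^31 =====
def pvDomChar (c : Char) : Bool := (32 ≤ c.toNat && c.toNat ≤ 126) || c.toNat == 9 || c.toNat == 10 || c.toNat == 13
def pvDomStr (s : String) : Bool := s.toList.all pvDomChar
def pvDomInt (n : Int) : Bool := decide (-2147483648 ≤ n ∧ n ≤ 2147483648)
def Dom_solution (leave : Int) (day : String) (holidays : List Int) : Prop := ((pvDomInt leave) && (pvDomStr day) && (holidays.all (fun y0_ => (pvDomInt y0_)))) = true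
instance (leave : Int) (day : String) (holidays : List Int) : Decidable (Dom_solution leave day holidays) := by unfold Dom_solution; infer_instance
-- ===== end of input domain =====

-- B replaces A's per-start greedy break loop (a leave counter decremented until it runs out)
-- by a once-computed prefix count of non-holiday days and a per-start count of the days d
-- whose window [s..d] uses at most max(leave,0) leaves (objective: alternative decomposition).
-- add_holidays appends to the Python holidays list identically in A and in B; the equivalence
-- proved here is about the return value.

-- ===== PORT A =====
def weekendStartDict : PySem.Dict String Int :=
  PySem.Dict.ofList [("MON", 6), ("TUE", 5), ("WED", 4), ("THU", 3), ("FRI", 2), ("SAT", 1), ("SUN", 7)]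

-- weekend_start[day] raises KeyError when day is not a weekday name: excluded by Pre_solution
-- (the getD default 0 is never read inside Pre_).
def addHolidays (day : String) (holidays : List Int) : List Int :=
  let weekendStartDay := weekendStartDict.getD day 0
  let holidays := if day == "SUN" then holidays ++ [1] else holidays
  (PySem.List.pyRange weekendStartDay 31 7).foldl
    (fun acc d =>
      let nextDay := d + 1
      let acc := if d ≤ 30 then acc ++ [d] else acc
      if nextDay ≤ 30 then acc ++ [nextDay] else acc)
    holidays

def innerA (hset : PySem.Set Int) : List Int → Int → Int → Int
  | [], cnt, _ => cnt
  | d :: ds, cnt, leftLeave =>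
    if !PySem.Set.contains hset d then
      if leftLeave > 0 then innerA hset ds (cnt + 1) (leftLeave - 1)
      else cnt
    else innerA hset ds (cnt + 1) leftLeave

def solution (leave : Int) (day : String) (holidays : List Int) : Int :=
  let holidays := addHolidays day holidays
  let holidaysSet : PySem.Set Int := PySem.Set.ofList holidays
  (PySem.List.pyRange 1 31 1).foldl
    (fun answer startDay =>
      max answer (innerA holidaysSet (PySem.List.pyRange startDay 31 1) 0 leave))
    (-1)

-- ===== PORT B =====
-- prefix[d] and prefix[s-1] are always in range in Source B; pyGetD's default 0 is never read.
def spanB (prefixL : List Int) (budget s : Int) : Int :=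
  (PySem.List.pyRange s 31 1).foldl
    (fun span d =>
      if PySem.List.pyGetD prefixL d 0 - PySem.List.pyGetD prefixL (s - 1) 0 ≤ budget then span + 1
      else span)
    0

def solution_alt (leave : Int) (day : String) (holidays : List Int) : Int :=
  let holidays := addHolidays day holidays
  let holidaysSet : PySem.Set Int := PySem.Set.ofList holidays
  let budget := if leave > 0 then leave else 0
  let pt := (PySem.List.pyRange 1 31 1).foldl
    (fun (st : List Int × Int) d =>
      let total := if !PySem.Set.contains holidaysSet d then st.2 + 1 else st.2
      (st.1 ++ [total], total))
    ([0], 0)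
  (PySem.List.pyRange 1 31 1).foldl
    (fun best s => max best (spanB pt.1 budget s)) 0

-- ===== PRECONDITION & SPEC =====
-- Pre_ excludes exactly the inputs where A raises KeyError on weekend_start[day].
def Pre_solution (leave : Int) (day : String) (holidays : List Int) : Prop :=
  day ∈ ["MON", "TUE", "WED", "THU", "FRI", "SAT", "SUN"]
instance (leave : Int) (day : String) (holidays : List Int) : Decidable (Pre_solution leave day holidays) := by unfold Pre_solution; infer_instance

def pvWitness_solution : Int × String × List Int := (1, "MON", [15])

def Spec_solution (leave : Int) (day : String) (holidays : List Int) (out : Int) : Prop := out = solution_alt leave day holidays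
instance (leave : Int) (day : String) (holidays : List Int) (out : Int) : Decidable (Spec_solution leave day holidays out) := by unfold Spec_solution; infer_instance

-- ===== CLAIM (what is proved, stated in full; the proofs are below) =====
def Claim_equal_solution : Prop := ∀ (leave : Int) (day : String) (holidays : List Int), Dom_solution leave day holidays → Pre_solution leave day holidays → Spec_solution leave day holidays (solution leave day holidays)

-- ===== LEMMAS AND PROOFS =====

-- proof-only helpers
def nonHol (hset : PySem.Set Int) (d : Int) : Bool := !PySem.Set.contains hset d

-- number of non-holiday days among 1..j  (the value prefix[j] holds in Source B)
def cpre (hset : PySem.Set Int) (j : Int) : Int :=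
  ((PySem.List.pyRange 1 (j + 1) 1).countP (nonHol hset) : Int)

theorem innerA_acc (hset : PySem.Set Int) (ds : List Int) (cnt leftLeave : Int) :
    innerA hset ds cnt leftLeave = cnt + innerA hset ds 0 leftLeave := by
  induction ds generalizing cnt leftLeave with
  | nil => simp [innerA]
  | cons d ds ih =>
    by_cases h : PySem.Set.contains hset d
    · simp only [innerA, h, Bool.not_true, Bool.false_eq_true, if_false]
      rw [ih (cnt + 1), ih (0 + 1)]; ring
    · simp only [innerA, h, Bool.not_false, if_true]
      by_cases hl : leftLeave > 0
      · simp only [hl, if_true]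
        rw [ih (cnt + 1), ih (0 + 1)]; ring
      · simp [hl]

theorem innerA_nonpos (hset : PySem.Set Int) (ds : List Int) (cnt leftLeave : Int)
    (h : leftLeave ≤ 0) : innerA hset ds cnt leftLeave = innerA hset ds cnt 0 := by
  induction ds generalizing cnt with
  | nil => simp [innerA]
  | cons d ds ih =>
    simp only [innerA]
    by_cases hc : (!PySem.Set.contains hset d) = true
    · rw [if_pos hc, if_pos hc, if_neg (show ¬ leftLeave > 0 by omega),
        if_neg (show ¬ (0 : Int) > 0 by omega)]
    · rw [if_neg hc, if_neg hc, ih]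

theorem innerA_count (hset : PySem.Set Int) (n : Nat) :
    ∀ (a L : Int), 0 ≤ L →
    innerA hset (PySem.List.pyRange a (a + n) 1) 0 L =
      (((PySem.List.pyRange a (a + n) 1).countP
        (fun d => decide ((((PySem.List.pyRange a (d + 1) 1).countP (nonHol hset) : Int)) ≤ L))) : Int) := by
  induction n with
  | zero => intro a L _; simp [innerA]
  | succ n ih =>
    intro a L hL
    have hsplit : a + ((n+1 : Nat) : Int) = (a + 1) + (n : Nat) := by push_cast; ring
    rw [hsplit, PySem.List.pyRange_one_cons (by omega : a < (a + 1) + (n : Nat))]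
    have hcons : ∀ d : Int, a ≤ d → PySem.List.pyRange a (d + 1) 1 = a :: PySem.List.pyRange (a + 1) (d + 1) 1 :=
      fun d hd => PySem.List.pyRange_one_cons (by omega)
    have hhead : ((PySem.List.pyRange a (a + 1) 1).countP (nonHol hset) : Int)
        = if nonHol hset a then 1 else 0 := by
      rw [PySem.List.pyRange_one_singleton]; simp [List.countP_cons]
    simp only [innerA, List.countP_cons]
    by_cases hc : (!PySem.Set.contains hset a) = true
    -- a is a non-holiday
    · rw [if_pos hc]
      have hna : nonHol hset a = true := hc
      by_cases hL0 : L > 0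
      · rw [if_pos hL0, innerA_acc, ih (a+1) (L-1) (by omega)]
        have hpred : ∀ x ∈ PySem.List.pyRange (a+1) ((a+1) + (n:Nat)) 1,
            (decide ((((PySem.List.pyRange (a+1) (x + 1) 1).countP (nonHol hset) : Int)) ≤ L - 1)) = true ↔
            (decide ((((PySem.List.pyRange a (x + 1) 1).countP (nonHol hset) : Int)) ≤ L)) = true := by
          intro x hx
          have hax : a + 1 ≤ x := (PySem.List.mem_pyRange_one.mp hx).1
          rw [hcons x (by omega), List.countP_cons]
          simp only [hna, if_pos, decide_eq_true_eq]
          push_cast; omega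
        rw [List.countP_congr hpred]
        have h1 : (decide ((((PySem.List.pyRange a (a + 1) 1).countP (nonHol hset) : Int)) ≤ L)) = true := by
          rw [decide_eq_true_eq, hhead, if_pos hna]; omega
        rw [h1]
        simp
        omega
      · have hL0' : L = 0 := by omega
        rw [if_neg hL0]
        have hall : ∀ x ∈ PySem.List.pyRange (a+1) ((a+1) + (n:Nat)) 1,
            ¬ ((fun d => decide ((((PySem.List.pyRange a (d + 1) 1).countP (nonHol hset) : Int)) ≤ L)) x = true) := by
          intro x hx hcontra
          have hax : a + 1 ≤ x := (PySem.List.mem_pyRange_one.mp hx).1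
          simp only [decide_eq_true_eq] at hcontra
          rw [hcons x (by omega), List.countP_cons] at hcontra
          simp only [hna, if_pos] at hcontra
          push_cast at hcontra; omega
        rw [List.countP_eq_zero.mpr hall]
        have h1 : (decide ((((PySem.List.pyRange a (a + 1) 1).countP (nonHol hset) : Int)) ≤ L)) = false := by
          rw [decide_eq_false_iff_not, hhead, if_pos hna]; omega
        rw [h1]
        simp
    -- a is a holiday
    · rw [if_neg hc, innerA_acc, ih (a+1) L hL]
      have hna : nonHol hset a = false := by simpa [nonHol] using hc
      have hpred : ∀ x ∈ PySem.List.pyRange (a+1) ((a+1) + (n:Nat)) 1,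
          (decide ((((PySem.List.pyRange (a+1) (x + 1) 1).countP (nonHol hset) : Int)) ≤ L)) = true ↔
          (decide ((((PySem.List.pyRange a (x + 1) 1).countP (nonHol hset) : Int)) ≤ L)) = true := by
        intro x hx
        have hax : a + 1 ≤ x := (PySem.List.mem_pyRange_one.mp hx).1
        rw [hcons x (by omega), List.countP_cons]
        simp only [hna, decide_eq_true_eq]
        push_cast; omega
      rw [List.countP_congr hpred]
      have h1 : (decide ((((PySem.List.pyRange a (a + 1) 1).countP (nonHol hset) : Int)) ≤ L)) = true := by
        rw [decide_eq_true_eq, hhead, hna]; simp; omega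
      rw [h1]
      simp
      omega
theorem prefix_fold (hset : PySem.Set Int) (n : Nat) :
    (PySem.List.pyRange 1 ((n : Int) + 1) 1).foldl
      (fun (st : List Int × Int) d =>
        let total := if !PySem.Set.contains hset d then st.2 + 1 else st.2
        (st.1 ++ [total], total))
      ([0], 0)
    = ((PySem.List.pyRange 0 ((n : Int) + 1) 1).map (cpre hset), cpre hset n) := by
  induction n with
  | zero =>
    simp only [Nat.cast_zero, zero_add]
    rw [PySem.List.pyRange_one_eq_nil (le_refl (1:Int)),
      (by decide : PySem.List.pyRange 0 1 1 = [0])]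
    simp [cpre, PySem.List.pyRange_one_eq_nil (le_refl (1:Int))]
  | succ n ih =>
    have h1 : ((n + 1 : Nat) : Int) + 1 = ((n : Int) + 1) + 1 := by push_cast; ring
    rw [h1, PySem.List.pyRange_one_succ_right (by omega : (1:Int) ≤ (n:Int) + 1),
      PySem.List.pyRange_one_succ_right (by omega : (0:Int) ≤ (n:Int) + 1),
      List.foldl_append, ih, List.map_append]
    have hc : cpre hset ((n : Int) + 1)
        = if !PySem.Set.contains hset ((n : Int) + 1) then cpre hset n + 1 else cpre hset n := by
      unfold cpre
      rw [PySem.List.pyRange_one_succ_right (by omega : (1:Int) ≤ (n:Int) + 1),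
        List.countP_append]
      simp [nonHol]
      split_ifs <;> omega
    simp only [List.foldl_cons, List.foldl_nil, List.map_cons, List.map_nil]
    rw [← hc, Nat.cast_add, Nat.cast_one]
theorem cpre_diff (hset : PySem.Set Int) (s d : Int) (h1 : 1 ≤ s) (h2 : s ≤ d + 1) :
    cpre hset d - cpre hset (s - 1) =
      ((PySem.List.pyRange s (d + 1) 1).countP (nonHol hset) : Int) := by
  unfold cpre
  rw [show s - 1 + 1 = s by ring,
    PySem.List.pyRange_one_append 1 s (d + 1) h1 h2, List.countP_append]
  push_cast; ring
theorem spanB_eq (hset : PySem.Set Int) (budget s : Int) (hs1 : 1 ≤ s) (hs2 : s < 31) :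
    spanB ((PySem.List.pyRange 0 31 1).map (cpre hset)) budget s =
      (((PySem.List.pyRange s 31 1).countP
        (fun d => decide ((((PySem.List.pyRange s (d + 1) 1).countP (nonHol hset) : Int)) ≤ budget))) : Int) := by
  unfold spanB
  have hcg :
      (PySem.List.pyRange s 31 1).foldl
        (fun (span : Int) d =>
          if PySem.List.pyGetD ((PySem.List.pyRange 0 31 1).map (cpre hset)) d 0 -
              PySem.List.pyGetD ((PySem.List.pyRange 0 31 1).map (cpre hset)) (s - 1) 0 ≤ budget
          then span + 1 else span)
        0
      = (PySem.List.pyRange s 31 1).foldl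
        (fun (span : Int) d =>
          if (((PySem.List.pyRange s (d + 1) 1).countP (nonHol hset) : Int)) ≤ budget
          then span + 1 else span)
        0 := by
    apply PySem.List.foldl_congr_mem
    intro acc d hd
    have hmem := PySem.List.mem_pyRange_one.mp hd
    rw [PySem.List.pyGetD_map_pyRange_of_nonneg _ _ _ _ (by omega) (by omega),
      PySem.List.pyGetD_map_pyRange_of_nonneg _ _ _ _ (by omega) (by omega),
      cpre_diff hset s d hs1 (by omega)]
  refine Eq.trans hcg ?_
  rw [PySem.List.foldl_ite_add_one]
  simp
theorem foldl_max_init (g : Int → Int) (x : Int) (l : List Int) (hx : 0 ≤ g x) :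
    (x :: l).foldl (fun acc s => max acc (g s)) (-1) =
    (x :: l).foldl (fun acc s => max acc (g s)) 0 := by
  simp only [List.foldl_cons]
  have : max (-1) (g x) = max 0 (g x) := by omega
  rw [this]

theorem prefix_fold30 (hset : PySem.Set Int) :
    (PySem.List.pyRange 1 31 1).foldl
      (fun (st : List Int × Int) d =>
        let total := if !PySem.Set.contains hset d then st.2 + 1 else st.2
        (st.1 ++ [total], total))
      ([0], 0)
    = ((PySem.List.pyRange 0 31 1).map (cpre hset), cpre hset 30) := by
  have h := prefix_fold hset 30
  simp only [Nat.cast_ofNat] at h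
  rw [show (30 : Int) + 1 = 31 from by norm_num] at h
  exact h

-- ===== VERDICT (by name: the statement is the Claim_ definition above) =====
theorem solution_spec : Claim_equal_solution := by
  intro leave day holidays _ _
  unfold Spec_solution solution solution_alt
  dsimp only
  set hol := addHolidays day holidays with hhol
  set hset : PySem.Set Int := PySem.Set.ofList hol with hhset
  set budget : Int := (if leave > 0 then leave else 0) with hbudget
  have hb0 : 0 ≤ budget := by rw [hbudget]; split_ifs <;> omega
  rw [prefix_fold30 hset]
  set g : Int → Int := fun s =>
    (((PySem.List.pyRange s 31 1).countP
      (fun d => decide ((((PySem.List.pyRange s (d + 1) 1).countP (nonHol hset) : Int)) ≤ budget))) : Int)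
    with hg
  have hA : ∀ s, s ∈ PySem.List.pyRange 1 31 1 →
      innerA hset (PySem.List.pyRange s 31 1) 0 leave = g s := by
    intro s hs
    have hmem := PySem.List.mem_pyRange_one.mp hs
    have hb : innerA hset (PySem.List.pyRange s 31 1) 0 leave
        = innerA hset (PySem.List.pyRange s 31 1) 0 budget := by
      by_cases hl : leave > 0
      · rw [hbudget]; simp [hl]
      · rw [innerA_nonpos hset _ 0 leave (by omega), hbudget]; simp [hl]
    rw [hb, hg]
    have h31 : (31 : Int) = s + ((31 - s).toNat : Int) := by omega
    rw [h31, innerA_count hset (31 - s).toNat s budget hb0]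
  have hB : ∀ s, s ∈ PySem.List.pyRange 1 31 1 →
      spanB ((PySem.List.pyRange 0 31 1).map (cpre hset)) budget s = g s := by
    intro s hs
    have hmem := PySem.List.mem_pyRange_one.mp hs
    exact spanB_eq hset budget s hmem.1 hmem.2
  have hL : (PySem.List.pyRange 1 31 1).foldl
      (fun answer startDay => max answer (innerA hset (PySem.List.pyRange startDay 31 1) 0 leave)) (-1)
      = (PySem.List.pyRange 1 31 1).foldl (fun acc s => max acc (g s)) (-1) := by
    apply PySem.List.foldl_congr_mem
    intro acc s hs
    rw [hA s hs]
  have hR : (PySem.List.pyRange 1 31 1).foldl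
      (fun best s => max best (spanB ((PySem.List.pyRange 0 31 1).map (cpre hset)) budget s)) 0
      = (PySem.List.pyRange 1 31 1).foldl (fun acc s => max acc (g s)) 0 := by
    apply PySem.List.foldl_congr_mem
    intro acc s hs
    rw [hB s hs]
  refine Eq.trans (Eq.trans hL ?_) hR.symm
  rw [PySem.List.pyRange_one_cons (by norm_num : (1 : Int) < 31)]
  exact foldl_max_init g 1 _ (by rw [hg]; exact Int.natCast_nonneg _)
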